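-- pv_equiv track=rewrite | github.com/leesh2015/financial-timeseries-python | Section3.Production Investment Strategy/Chapter3.Adaptive-Macro-Enhanced-RL/functions_.py | max_loss
-- ===== SOURCE A (Python) =====
-- def max_loss(results):
--     """
--     Calculate maximum consecutive days of loss.
--     """
--     loss_streaks = []
--     current_streak = 0
--     for i in range(1, len(results)):
--         if results[i] < results[i-1]:
--             current_streak += 1
--         else:
--             loss_streaks.append(current_streak)
--             current_streak = 0
--     loss_streaks.append(current_streak)
--     return max(loss_streaks) if loss_streaks else 0
-- ===== SOURCE B (Python) =====
-- def max_loss(results):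
--     diffs = [b < a for a, b in zip(results, results[1:])]
--     n = len(diffs)
--     best = 0
--     i = 0
--     while i < n:
--         if diffs[i]:
--             j = i
--             while j < n and diffs[j]:
--                 j += 1
--             if j - i > best:
--                 best = j - i
--             i = j
--         else:
--             i += 1
--     return best
-- ===== Notes on version B (the rewrite author's own statement) =====
-- stated objective: alternative
-- what changed: Replaces A's streak-accumulator-plus-list loop with a two-phase derive-then-reduce: first build the boolean decrease sequence via zip, then recursively scan it run by run, taking the max over whole runs of True.
import Mathlib
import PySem

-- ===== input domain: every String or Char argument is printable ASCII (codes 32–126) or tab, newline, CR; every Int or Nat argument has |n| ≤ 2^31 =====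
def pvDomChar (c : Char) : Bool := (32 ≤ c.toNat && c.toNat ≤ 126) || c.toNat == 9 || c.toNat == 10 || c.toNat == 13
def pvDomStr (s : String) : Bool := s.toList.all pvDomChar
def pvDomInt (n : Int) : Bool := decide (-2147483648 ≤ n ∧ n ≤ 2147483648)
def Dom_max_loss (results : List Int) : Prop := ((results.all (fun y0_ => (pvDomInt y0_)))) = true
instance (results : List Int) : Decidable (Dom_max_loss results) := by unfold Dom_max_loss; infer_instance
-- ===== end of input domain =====

-- B replaces A's streak-accumulator-plus-list loop by a two-phase derive-then-reduce:
-- first the boolean decrease sequence, then an index-skipping scan over whole runs of True.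

-- ===== PORT A =====
def max_loss (results : List Int) : Int :=
  let st := (PySem.List.pyRange 1 (results.length : Int) 1).foldl
    (fun (st : List Int × Int) i =>
      if PySem.List.pyGetD results i 0 < PySem.List.pyGetD results (i - 1) 0 then
        (st.1, st.2 + 1)
      else
        (st.1 ++ [st.2], 0))
    ([], 0)
  let loss_streaks := st.1 ++ [st.2]
  if loss_streaks = [] then 0
  else (PySem.List.max? loss_streaks (fun y => y)).getD 0

-- ===== PORT B =====
-- the inner while: advance j past the current run of True
def runEnd (ds : List Bool) (n j : Nat) : Nat :=
  if h : j < n ∧ ds.getD j false = true then runEnd ds n (j + 1) else j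
termination_by n - j
decreasing_by omega

lemma runEnd_ge (ds : List Bool) (n j : Nat) : j ≤ runEnd ds n j := by
  induction j using runEnd.induct (ds := ds) (n := n) with
  | case1 j h ih => rw [runEnd, dif_pos h]; omega
  | case2 j h => rw [runEnd, dif_neg h]

-- the outer while: skip over runs, keeping the best run length
def scanLoop (ds : List Bool) (n i : Nat) (best : Int) : Int :=
  if hi : i < n then
    if hd : ds.getD i false = true then
      let j := runEnd ds n i
      scanLoop ds n j (if (j : Int) - (i : Int) > best then (j : Int) - (i : Int) else best)
    else scanLoop ds n (i + 1) best
  else best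
termination_by n - i
decreasing_by
  · have h1 : i + 1 ≤ runEnd ds n i := by
      rw [runEnd, dif_pos ⟨hi, hd⟩]; exact runEnd_ge ds n (i + 1)
    omega
  · omega

def max_loss_alt (results : List Int) : Int :=
  let diffs := (results.zip (PySem.List.slice results (some 1) none)).map
    (fun p => decide (p.2 < p.1))
  scanLoop diffs diffs.length 0 0

-- ===== PRECONDITION & SPEC =====
def Spec_max_loss (results : List Int) (out : Int) : Prop := out = max_loss_alt results
instance (results : List Int) (out : Int) : Decidable (Spec_max_loss results out) := by unfold Spec_max_loss; infer_instance

-- ===== CLAIM (what is proved, stated in full; the proofs are below) =====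
def Claim_equal_max_loss : Prop := ∀ (results : List Int), Dom_max_loss results → Spec_max_loss results (max_loss results)

-- ===== LEMMAS AND PROOFS =====

-- length of the leading run of True (proof-side characterisation of the inner while)
def leadTrue : List Bool → Nat
  | true :: rest => leadTrue rest + 1
  | _ => 0

-- longest run of True, recursively over runs (proof-side value both programs compute)
def maxRun : List Bool → Int
  | [] => 0
  | false :: rest => maxRun rest
  | true :: rest =>
      max ((leadTrue (true :: rest) : Nat) : Int)
          (maxRun ((true :: rest).drop (leadTrue (true :: rest))))
termination_by ds => ds.length
decreasing_by all_goals simp [leadTrue]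

-- the streak list A's loop produces, as a recursion over the boolean decrease sequence
def afold : Int → List Bool → List Int
  | c, [] => [c]
  | c, true :: ds => afold (c + 1) ds
  | c, false :: ds => c :: afold 0 ds

-- A's loop body, with the comparison abstracted into a Bool
def gstep (st : List Int × Int) (b : Bool) : List Int × Int :=
  if b then (st.1, st.2 + 1) else (st.1 ++ [st.2], 0)

-- max of a nonempty list, Python-style running max
def maxL : List Int → Int
  | [] => 0
  | x :: t => t.foldl max x

-- A's streak machine, functionally: tracked max instead of a list
def mstate : Int → List Bool → Int
  | c, [] => c
  | c, true :: ds => mstate (c + 1) ds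
  | c, false :: ds => max c (mstate 0 ds)

lemma afold_ne_nil (c : Int) (ds : List Bool) : afold c ds ≠ [] := by
  induction ds generalizing c with
  | nil => simp [afold]
  | cons d ds ih => cases d <;> simp [afold, ih]

lemma foldl_gstep (ds : List Bool) (s : List Int) (c : Int) :
    (ds.foldl gstep (s, c)).1 ++ [(ds.foldl gstep (s, c)).2] = s ++ afold c ds := by
  induction ds generalizing s c with
  | nil => simp [afold]
  | cons d ds ih =>
      cases d with
      | true => simpa [gstep, afold] using ih s (c + 1)
      | false => simp [gstep, afold, ih (s ++ [c]) 0]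

lemma foldl_max_init (t : List Int) (a b : Int) :
    t.foldl max (max a b) = max a (t.foldl max b) := by
  induction t generalizing b with
  | nil => simp
  | cons x t ih => simp [List.foldl, max_assoc, ih]

lemma maxL_cons (c : Int) (l : List Int) (h : l ≠ []) :
    maxL (c :: l) = max c (maxL l) := by
  cases l with
  | nil => exact absurd rfl h
  | cons x t => simp [maxL, List.foldl, foldl_max_init]

lemma maxL_afold (ds : List Bool) (c : Int) : maxL (afold c ds) = mstate c ds := by
  induction ds generalizing c with
  | nil => simp [afold, mstate, maxL]
  | cons d ds ih =>
      cases d with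
      | true => simp [afold, mstate, ih]
      | false =>
          rw [afold, maxL_cons c _ (afold_ne_nil 0 ds), ih, mstate]

lemma maxRun_nonneg (ds : List Bool) : 0 ≤ maxRun ds := by
  induction ds using maxRun.induct with
  | case1 => simp [maxRun]
  | case2 rest ih => simpa [maxRun] using ih
  | case3 rest ih => simp [maxRun]

lemma maxRun_lead (ds : List Bool) :
    max ((leadTrue ds : Nat) : Int) (maxRun (ds.drop (leadTrue ds))) = maxRun ds := by
  cases ds with
  | nil => simp [leadTrue, maxRun]
  | cons d rest =>
      cases d with
      | false =>
          have := maxRun_nonneg (false :: rest)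
          simp [leadTrue]
          omega
      | true => rw [maxRun]

lemma mstate_eq (ds : List Bool) (c : Int) (hc : 0 ≤ c) :
    mstate c ds = max (c + (leadTrue ds : Nat)) (maxRun (ds.drop (leadTrue ds))) := by
  induction ds generalizing c with
  | nil => simp [mstate, leadTrue, maxRun]; omega
  | cons d ds ih =>
      cases d with
      | true =>
          rw [mstate, ih (c + 1) (by omega), leadTrue]
          push_cast
          simp only [List.drop_succ_cons]
          omega
      | false =>
          rw [mstate, ih 0 le_rfl]
          simp only [leadTrue, Nat.cast_zero, zero_add, List.drop_zero]
          rw [maxRun_lead ds]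
          simp [maxRun]

lemma mstate_zero (ds : List Bool) : mstate 0 ds = maxRun ds := by
  rw [mstate_eq ds 0 le_rfl, zero_add, maxRun_lead]

-- B side: the inner while computes the end of the leading run of True
lemma runEnd_le (ds : List Bool) (n j : Nat) (h : j ≤ n) : runEnd ds n j ≤ n := by
  revert h
  induction j using runEnd.induct (ds := ds) (n := n) with
  | case1 j hc ih => intro h; rw [runEnd, dif_pos hc]; exact ih (by omega)
  | case2 j hc => intro h; rw [runEnd, dif_neg hc]; exact h

lemma runEnd_eq (ds : List Bool) (j : Nat) (h : j ≤ ds.length) :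
    runEnd ds ds.length j = j + leadTrue (ds.drop j) := by
  revert h
  induction j using runEnd.induct (ds := ds) (n := ds.length) with
  | case1 j hc ih =>
      intro h
      rw [runEnd, dif_pos hc, ih (by omega)]
      have hdrop := List.drop_eq_getElem_cons (l := ds) (i := j) hc.1
      have hget : ds[j] = true := by
        have := List.getD_eq_getElem ds false hc.1
        rw [← this]; exact hc.2
      rw [hdrop, hget, leadTrue]
      omega
  | case2 j hc =>
      intro h
      rw [runEnd, dif_neg hc]
      rcases Nat.lt_or_ge j ds.length with hj | hj
      · have hget : ds.getD j false = false := by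
          rcases Bool.eq_false_or_eq_true (ds.getD j false) with h' | h'
          · exact absurd ⟨hj, h'⟩ hc
          · exact h'
        have hdrop := List.drop_eq_getElem_cons (l := ds) (i := j) hj
        have : ds[j] = false := by
          have := List.getD_eq_getElem ds false hj
          rw [← this]; exact hget
        rw [hdrop, this]
        simp [leadTrue]
      · rw [List.drop_eq_nil_of_le hj]
        simp [leadTrue]

-- B side: the outer while computes max best (maxRun of the rest)
lemma scanLoop_eq (ds : List Bool) (i : Nat) (best : Int)
    (hi : i ≤ ds.length) (hb : 0 ≤ best) :
    scanLoop ds ds.length i best = max best (maxRun (ds.drop i)) := by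
  revert hi hb
  induction i, best using scanLoop.induct (ds := ds) (n := ds.length) with
  | case1 i best hlt hget j ih =>
      intro hi hb
      rw [scanLoop, dif_pos hlt, dif_pos hget]
      dsimp only
      have hjdef : runEnd ds ds.length i = i + leadTrue (ds.drop i) := runEnd_eq ds i (by omega)
      set L := leadTrue (ds.drop i) with hL
      have hdrop := List.drop_eq_getElem_cons (l := ds) (i := i) hlt
      have hgetT : ds[i] = true := by
        have := List.getD_eq_getElem ds false hlt
        rw [← this]; exact hget
      have hL1 : 1 ≤ L := by
        rw [hL, hdrop, hgetT, leadTrue]; omega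
      have hle : runEnd ds ds.length i ≤ ds.length := runEnd_le ds ds.length i (by omega)
      have ih' := ih hle (by split <;> omega)
      simp only [dite_eq_ite] at ih'
      rw [show runEnd ds ds.length i = j from rfl] at *
      rw [ih']
      have hdd : ds.drop j = (ds.drop i).drop L := by
        rw [List.drop_drop, hjdef]
      rw [hdd]
      have hmr := maxRun_lead (ds.drop i)
      rw [← hL] at hmr
      have hbest : (if (j : Int) - (i : Int) > best
          then (j : Int) - (i : Int) else best) = max best (L : Int) := by
        rw [hjdef]; push_cast; split <;> omega
      rw [hbest]
      omega
  | case2 i best hlt hget ih =>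
      intro hi hb
      rw [scanLoop, dif_pos hlt, dif_neg hget]
      have hdrop := List.drop_eq_getElem_cons (l := ds) (i := i) hlt
      have hgetF : ds[i] = false := by
        have := List.getD_eq_getElem ds false hlt
        rw [← this]; simpa using hget
      rw [ih (by omega) hb, hdrop, hgetF, maxRun]
  | case3 i best hlt =>
      intro hi hb
      rw [scanLoop, dif_neg hlt]
      rw [List.drop_eq_nil_of_le (by omega), maxRun]
      omega

-- the boolean decrease sequence read off by index equals the one built by zip
lemma map_range_eq_diffs (xs : List Int) :
    (PySem.List.pyRange 1 (xs.length : Int) 1).map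
      (fun i => decide (PySem.List.pyGetD xs i 0 < PySem.List.pyGetD xs (i - 1) 0))
      = (xs.zip (xs.drop 1)).map (fun p => decide (p.2 < p.1)) := by
  apply List.ext_getElem
  · simp [PySem.List.length_pyRange_one]
  · intro j h1 h2
    have hj : j < xs.length - 1 := by
      simpa [PySem.List.length_pyRange_one] using h1
    have hlen : 1 + (j : Int) < (xs.length : Int) := by omega
    simp only [List.getElem_map, PySem.List.getElem_pyRange_one]
    have hg1 : PySem.List.pyGetD xs (1 + (j : Int)) 0 = xs[(j + 1 : Nat)]'(by omega) := by
      rw [PySem.List.pyGetD_eq_getElem xs 0 (by omega) hlen]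
      congr 1
      omega
    have hg2 : PySem.List.pyGetD xs (1 + (j : Int) - 1) 0 = xs[j]'(by omega) := by
      have : (1 + (j : Int) - 1) = ((j : Nat) : Int) := by omega
      rw [this, PySem.List.pyGetD_eq_getElem xs 0 (by omega) (by omega)]
      simp
    rw [hg1, hg2]
    simp [List.getElem_zip]

-- ===== VERDICT (by name: the statement is the Claim_ definition above) =====
theorem max_loss_spec : Claim_equal_max_loss := by
  intro results _
  show max_loss results = max_loss_alt results
  unfold max_loss max_loss_alt
  dsimp only
  rw [PySem.List.slice_from_one, ← List.drop_one]
  have hbody : (fun (st : List Int × Int) (i : Int) =>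
      if PySem.List.pyGetD results i 0 < PySem.List.pyGetD results (i - 1) 0 then
        (st.1, st.2 + 1)
      else
        (st.1 ++ [st.2], 0))
      = (fun (st : List Int × Int) (i : Int) =>
          gstep st (decide (PySem.List.pyGetD results i 0 < PySem.List.pyGetD results (i - 1) 0))) := by
    funext st i
    by_cases h : PySem.List.pyGetD results i 0 < PySem.List.pyGetD results (i - 1) 0 <;>
      simp [gstep, h]
  rw [hbody, ← List.foldl_map, map_range_eq_diffs]
  set ds := (results.zip (results.drop 1)).map (fun p => decide (p.2 < p.1)) with hds
  have hstreaks := foldl_gstep ds [] 0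
  simp only [List.nil_append] at hstreaks
  rw [hstreaks]
  have hne := afold_ne_nil 0 ds
  obtain ⟨x, t, hxt⟩ := List.exists_cons_of_ne_nil hne
  rw [if_neg (by simp [hxt]), hxt, PySem.List.max?_id_cons, Option.getD_some]
  have hmaxL : t.foldl max x = maxL (afold 0 ds) := by rw [hxt]; rfl
  rw [hmaxL, maxL_afold, mstate_zero]
  rw [scanLoop_eq ds 0 0 (by omega) le_rfl]
  simp only [List.drop_zero]
  have := maxRun_nonneg ds
  omega
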